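-- pv_equiv track=rewrite | github.com/Roiw/LeetCode | Python/1433_CheckIfAStringCanBreakAnotherString.py | checkIfCanBreak
-- ===== SOURCE A (Python) =====
-- def checkIfCanBreak(s1: str, s2: str) -> bool:
--     sort1 = sorted(s1)
--     sort2 = sorted(s2)
--
--     check1 = True
--     check2 = True
--
--     for i in range(len(sort1)):
--         if sort2[i] < sort1[i]:
--             check1 = False
--         if sort1[i] < sort2[i]:
--             check2 = False
--
--     return  check1 or check2
-- ===== SOURCE B (Python) =====
-- def checkIfCanBreak(s1: str, s2: str) -> bool:
--     # Counting-sort domination check: the sorted strings are compared position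
--     # by position over their common length m = min(len(s1), len(s2)), so both
--     # running histogram prefix counts are capped at m and one of them must
--     # dominate the other throughout.
--     counts1 = [0] * 128
--     counts2 = [0] * 128
--     for ch in s1:
--         counts1[ord(ch)] += 1
--     for ch in s2:
--         counts2[ord(ch)] += 1
--     m = min(len(s1), len(s2))
--     a = 0
--     b = 0
--     can1 = True   # sorted(s2) can break sorted(s1)
--     can2 = True   # sorted(s1) can break sorted(s2)
--     for code in range(128):
--         a = min(a + counts1[code], m)
--         b = min(b + counts2[code], m)
--         if a > b:
--             can2 = False
--         if b > a:
--             can1 = False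
--     return can1 or can2
-- ===== Notes on version B (the rewrite author's own statement) =====
-- stated objective: faster
-- what changed: B replaces sorting both strings and scanning positions with a counting sort: it builds 128-entry character histograms and checks that one running prefix count dominates the other, both capped at the common length min(len(s1), len(s2)); Pre_ excludes only the inputs where A raises IndexError (len(s1) > len(s2)).
import Mathlib
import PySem

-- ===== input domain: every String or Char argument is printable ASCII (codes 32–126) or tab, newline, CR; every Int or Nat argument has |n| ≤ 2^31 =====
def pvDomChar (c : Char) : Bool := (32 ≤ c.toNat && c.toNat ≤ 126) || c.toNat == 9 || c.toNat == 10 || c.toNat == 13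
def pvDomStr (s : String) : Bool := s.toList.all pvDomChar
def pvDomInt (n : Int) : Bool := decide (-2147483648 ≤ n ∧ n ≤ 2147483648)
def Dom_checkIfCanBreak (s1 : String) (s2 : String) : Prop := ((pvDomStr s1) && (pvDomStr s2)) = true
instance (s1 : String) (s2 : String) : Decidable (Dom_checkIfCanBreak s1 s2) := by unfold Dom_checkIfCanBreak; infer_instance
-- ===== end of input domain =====

-- B replaces sorting both strings with a counting sort: 128-entry character
-- histograms whose running prefix counts, capped at the common length, are
-- compared for domination (objective: faster).

-- ===== PORT A =====
def checkIfCanBreak (s1 : String) (s2 : String) : Bool :=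
  let sort1 := PySem.List.sorted s1.toList (fun x => x)
  let sort2 := PySem.List.sorted s2.toList (fun x => x)
  -- Python raises IndexError on sort2[i] when len(s1) > len(s2); the ' ' default is
  -- only reached outside Pre_checkIfCanBreak.
  let r := (PySem.List.pyRange 0 (sort1.length : Int)).foldl
    (fun (ck : Bool × Bool) i =>
      (if PySem.List.pyGetD sort2 i ' ' < PySem.List.pyGetD sort1 i ' ' then false else ck.1,
       if PySem.List.pyGetD sort1 i ' ' < PySem.List.pyGetD sort2 i ' ' then false else ck.2))
    (true, true)
  r.1 || r.2

-- ===== PORT B =====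
-- counts[ord(ch)] += 1
def bumpCount (c : List Int) (ch : Char) : List Int :=
  c.set ch.toNat (c.getD ch.toNat 0 + 1)

def checkIfCanBreak_alt (s1 : String) (s2 : String) : Bool :=
  let counts1 := s1.toList.foldl bumpCount (List.replicate 128 0)
  let counts2 := s2.toList.foldl bumpCount (List.replicate 128 0)
  let m : Int := min (s1.toList.length : Int) (s2.toList.length : Int)
  let r := (PySem.List.pyRange 0 128).foldl
    (fun (st : Int × Int × Bool × Bool) code =>
      let a := min (st.1 + counts1.getD code.toNat 0) m
      let b := min (st.2.1 + counts2.getD code.toNat 0) m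
      let can2 := if a > b then false else st.2.2.2
      let can1 := if b > a then false else st.2.2.1
      (a, b, can1, can2))
    (0, 0, true, true)
  r.2.2.1 || r.2.2.2

-- ===== PRECONDITION & SPEC =====
-- Pre_ excludes exactly the inputs on which A raises IndexError: len(s1) > len(s2).
def Pre_checkIfCanBreak (s1 : String) (s2 : String) : Prop :=
  s1.toList.length ≤ s2.toList.length
instance (s1 : String) (s2 : String) : Decidable (Pre_checkIfCanBreak s1 s2) := by
  unfold Pre_checkIfCanBreak; infer_instance

def pvWitness_checkIfCanBreak : String × String := ("abc", "xyza")

def Spec_checkIfCanBreak (s1 : String) (s2 : String) (out : Bool) : Prop :=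
  out = checkIfCanBreak_alt s1 s2
instance (s1 : String) (s2 : String) (out : Bool) : Decidable (Spec_checkIfCanBreak s1 s2 out) := by
  unfold Spec_checkIfCanBreak; infer_instance

-- ===== CLAIM (what is proved, stated in full; the proofs are below) =====
def Claim_equal_checkIfCanBreak : Prop := ∀ (s1 : String) (s2 : String), Dom_checkIfCanBreak s1 s2 → Pre_checkIfCanBreak s1 s2 → Spec_checkIfCanBreak s1 s2 (checkIfCanBreak s1 s2)

-- ===== LEMMAS AND PROOFS =====

-- number of characters of s with code ≤ c  /  code = c
def cntLe (s : List Char) (c : Int) : Nat := s.countP (fun ch => decide ((ch.toNat : Int) ≤ c))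
def cntEq (s : List Char) (c : Int) : Nat := s.countP (fun ch => ((ch.toNat : Int) == c))

lemma charLe_iff (a b : Char) : a ≤ b ↔ (a.toNat : Int) ≤ (b.toNat : Int) := by
  constructor
  · intro h; exact_mod_cast Nat.cast_le.mpr (Char.le_def.mp h)
  · intro h; exact Char.le_def.mpr (by exact_mod_cast h)

lemma cntLe_split (s : List Char) (c : Int) : cntLe s c = cntLe s (c - 1) + cntEq s c := by
  induction s with
  | nil => rfl
  | cons ch t ih =>
    simp only [cntLe, cntEq, List.countP_cons] at *
    simp only [decide_eq_true_eq, beq_iff_eq]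
    split_ifs <;> omega

lemma cntLe_le_length (s : List Char) (c : Int) : cntLe s c ≤ s.length :=
  List.countP_le_length

lemma cntLe_neg (s : List Char) (c : Int) (hc : c < 0) : cntLe s c = 0 := by
  apply List.countP_eq_zero.mpr
  intro ch _
  simp only [decide_eq_true_eq]
  omega

lemma cntLe_big (s : List Char) (c : Int) (hc : 126 ≤ c)
    (hDom : ∀ ch ∈ s, ch.toNat ≤ 126) : cntLe s c = s.length := by
  apply List.countP_eq_length.mpr
  intro ch hch
  simp only [decide_eq_true_eq]
  have := hDom ch hch
  omega

lemma cntLe_perm {s t : List Char} (h : s.Perm t) (c : Int) : cntLe s c = cntLe t c :=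
  h.countP_eq _

lemma cntLe_head_zero (x : Char) (t : List Char) (hx : ∀ y ∈ t, x ≤ y) (c : Int)
    (hc : ¬ (x.toNat : Int) ≤ c) : cntLe t c = 0 := by
  apply List.countP_eq_zero.mpr
  intro ch hch
  simp only [decide_eq_true_eq]
  have := (charLe_iff x ch).mp (hx ch hch)
  omega

-- on a sorted list, the i-th element is ≤ c  iff  i < (number of elements ≤ c)
lemma sorted_get_le_iff (l : List Char) (hl : l.Pairwise (· ≤ ·)) (c : Int) :
    ∀ (i : Nat) (h : i < l.length), (((l[i]).toNat : Int) ≤ c ↔ i < cntLe l c) := by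
  induction l with
  | nil => intro i h; simp at h
  | cons x t ih =>
    rcases List.pairwise_cons.mp hl with ⟨hx, ht⟩
    intro i h
    have hcnt : cntLe (x :: t) c = cntLe t c + (if (x.toNat : Int) ≤ c then 1 else 0) := by
      simp [cntLe, List.countP_cons]
    cases i with
    | zero =>
      rw [hcnt]
      simp only [List.getElem_cons_zero]
      by_cases hc : (x.toNat : Int) ≤ c
      · rw [if_pos hc]
        constructor
        · intro _; omega
        · intro _; exact hc
      · have h0 := cntLe_head_zero x t hx c hc
        rw [if_neg hc]
        constructor
        · intro hcc; exact absurd hcc hc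
        · intro hlt; omega
    | succ j =>
      have hj : j < t.length := by simpa using h
      have iht := ih ht j hj
      rw [hcnt]
      simp only [List.getElem_cons_succ]
      rw [iht]
      by_cases hc : (x.toNat : Int) ≤ c
      · rw [if_pos hc]; omega
      · have h0 := cntLe_head_zero x t hx c hc
        rw [if_neg hc]; omega

-- check2 of A: sorted(s1) dominates sorted(s2) on the first |s1| positions
lemma le_equiv (l1 l2 : List Char) (h1 : l1.Pairwise (· ≤ ·)) (h2 : l2.Pairwise (· ≤ ·))
    (hlen : l1.length ≤ l2.length) :
    (∀ (i : Nat) (hi : i < l1.length), l2[i]'(lt_of_lt_of_le hi hlen) ≤ l1[i]) ↔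
    (∀ c : Int, (cntLe l1 c : Int) ≤ (cntLe l2 c : Int)) := by
  constructor
  · intro hpt c
    by_cases hm : cntLe l1 c = 0
    · simp [hm]
    · set m := cntLe l1 c with hmdef
      have hml : m ≤ l1.length := cntLe_le_length _ _
      have hj : m - 1 < l1.length := by omega
      have h2c : ((l2[m-1]'(lt_of_lt_of_le hj hlen)).toNat : Int) ≤ c := by
        have h1c : ((l1[m-1]'hj).toNat : Int) ≤ c :=
          (sorted_get_le_iff l1 h1 c (m-1) hj).mpr (by omega)
        have := (charLe_iff _ _).mp (hpt (m-1) hj)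
        omega
      have := (sorted_get_le_iff l2 h2 c (m-1) (lt_of_lt_of_le hj hlen)).mp h2c
      omega
  · intro hcnt i hi
    set c : Int := ((l1[i]).toNat : Int) with hc
    have hi1 : i < cntLe l1 c := (sorted_get_le_iff l1 h1 c i hi).mp le_rfl
    have hi2 : i < cntLe l2 c := by have := hcnt c; omega
    have := (sorted_get_le_iff l2 h2 c i (lt_of_lt_of_le hi hlen)).mpr hi2
    exact (charLe_iff _ _).mpr this

-- check1 of A: sorted(s2) dominates sorted(s1) on the first |s1| positions
lemma ge_equiv (l1 l2 : List Char) (h1 : l1.Pairwise (· ≤ ·)) (h2 : l2.Pairwise (· ≤ ·))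
    (hlen : l1.length ≤ l2.length) :
    (∀ (i : Nat) (hi : i < l1.length), l1[i] ≤ l2[i]'(lt_of_lt_of_le hi hlen)) ↔
    (∀ c : Int, ¬ ((cntLe l1 c : Int) < (l1.length : Int) ∧ (cntLe l2 c : Int) > (cntLe l1 c : Int))) := by
  constructor
  · intro hpt c hcon
    obtain ⟨hlt, hgt⟩ := hcon
    set m := cntLe l1 c with hmdef
    have hm1 : m < l1.length := by omega
    have hnot : ¬ ((l1[m]'hm1).toNat : Int) ≤ c := by
      intro hle
      have := (sorted_get_le_iff l1 h1 c m hm1).mp hle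
      omega
    have h2le : ((l2[m]'(lt_of_lt_of_le hm1 hlen)).toNat : Int) ≤ c :=
      (sorted_get_le_iff l2 h2 c m (lt_of_lt_of_le hm1 hlen)).mpr (by omega)
    have := (charLe_iff _ _).mp (hpt m hm1)
    omega
  · intro hcnt i hi
    set c : Int := ((l2[i]'(lt_of_lt_of_le hi hlen)).toNat : Int) with hc
    have hi2 : i < cntLe l2 c := (sorted_get_le_iff l2 h2 c i (lt_of_lt_of_le hi hlen)).mp le_rfl
    have hi1 : i < cntLe l1 c := by
      by_contra hno
      exact hcnt c ⟨by omega, by omega⟩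
    have := (sorted_get_le_iff l1 h1 c i hi).mpr hi1
    exact (charLe_iff _ _).mpr this

-- characterization of A's loop
lemma foldA_eq (l1 l2 : List Char) (is : List Int) : ∀ (c1 c2 : Bool),
    is.foldl (fun (ck : Bool × Bool) i =>
      (if PySem.List.pyGetD l2 i ' ' < PySem.List.pyGetD l1 i ' ' then false else ck.1,
       if PySem.List.pyGetD l1 i ' ' < PySem.List.pyGetD l2 i ' ' then false else ck.2)) (c1, c2)
    = (c1 && is.all (fun i => !decide (PySem.List.pyGetD l2 i ' ' < PySem.List.pyGetD l1 i ' ')),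
       c2 && is.all (fun i => !decide (PySem.List.pyGetD l1 i ' ' < PySem.List.pyGetD l2 i ' '))) := by
  induction is with
  | nil => intro c1 c2; simp
  | cons i t ih =>
    intro c1 c2
    simp only [List.foldl_cons, List.all_cons]
    rw [ih]
    by_cases hx : PySem.List.pyGetD l2 i ' ' < PySem.List.pyGetD l1 i ' ' <;>
      by_cases hy : PySem.List.pyGetD l1 i ' ' < PySem.List.pyGetD l2 i ' ' <;>
      simp [hx, hy]

-- the histogram fold reads back each character's multiplicity
lemma countFold (s : List Char) : ∀ (acc : List Int) (k : Nat), k < acc.length →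
    (s.foldl bumpCount acc).getD k 0
      = acc.getD k 0 + (s.countP (fun ch => ch.toNat == k) : Int) := by
  induction s with
  | nil => intro acc k hk; simp
  | cons ch t ih =>
    intro acc k hk
    have hlen : (bumpCount acc ch).length = acc.length := by
      simp [bumpCount]
    have hstep : (bumpCount acc ch).getD k 0
        = acc.getD k 0 + (if ch.toNat = k then 1 else 0) := by
      by_cases hek : ch.toNat = k
      · subst hek; simp [bumpCount, List.getD, hk]
      · simp [bumpCount, List.getD, hek]
    simp only [List.foldl_cons, List.countP_cons]
    rw [ih (bumpCount acc ch) k (by omega), hstep]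
    by_cases hek : ch.toNat = k
    · simp [hek]; ring
    · simp [hek]

-- the running prefix counts and the two running checks that B's loop maintains
def runPre (l : List Char) (m : Int) : Int → List Int → Int
  | a, [] => a
  | a, c :: cs => runPre l m (min (a + (cntEq l c : Int)) m) cs

def okLe (l1 l2 : List Char) (m : Int) : Int → Int → List Int → Bool
  | _, _, [] => true
  | a, b, c :: cs =>
    (!decide (min (a + (cntEq l1 c : Int)) m > min (b + (cntEq l2 c : Int)) m)) &&
      okLe l1 l2 m (min (a + (cntEq l1 c : Int)) m) (min (b + (cntEq l2 c : Int)) m) cs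

def okGe (l1 l2 : List Char) (m : Int) : Int → Int → List Int → Bool
  | _, _, [] => true
  | a, b, c :: cs =>
    (!decide (min (b + (cntEq l2 c : Int)) m > min (a + (cntEq l1 c : Int)) m)) &&
      okGe l1 l2 m (min (a + (cntEq l1 c : Int)) m) (min (b + (cntEq l2 c : Int)) m) cs

-- characterization of B's loop (with the histogram reads already expressed as cntEq)
lemma foldB_eq (l1 l2 : List Char) (m : Int) (cs : List Int) : ∀ (a b : Int) (ge le : Bool),
    cs.foldl (fun (st : Int × Int × Bool × Bool) code =>
      (min (st.1 + (cntEq l1 code : Int)) m,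
       min (st.2.1 + (cntEq l2 code : Int)) m,
       if min (st.2.1 + (cntEq l2 code : Int)) m > min (st.1 + (cntEq l1 code : Int)) m then false
       else st.2.2.1,
       if min (st.1 + (cntEq l1 code : Int)) m > min (st.2.1 + (cntEq l2 code : Int)) m then false
       else st.2.2.2)) (a, b, ge, le)
    = (runPre l1 m a cs, runPre l2 m b cs,
       ge && okGe l1 l2 m a b cs,
       le && okLe l1 l2 m a b cs) := by
  induction cs with
  | nil => intro a b ge le; simp [runPre, okGe, okLe]
  | cons c t ih =>
    intro a b ge le
    simp only [List.foldl_cons]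
    rw [ih]
    simp only [runPre, okGe, okLe, Prod.mk.injEq]
    refine ⟨trivial, trivial, ?_, ?_⟩
    · by_cases h : min (b + (cntEq l2 c : Int)) m > min (a + (cntEq l1 c : Int)) m
      · simp [h]
      · simp [h]
    · by_cases h : min (a + (cntEq l1 c : Int)) m > min (b + (cntEq l2 c : Int)) m
      · simp [h]
      · simp [h]

lemma okLe_eq (l1 l2 : List Char) (m : Int) : ∀ (fuel : Nat) (k : Int), k = 128 - (fuel : Int) →
    okLe l1 l2 m (min (cntLe l1 (k - 1) : Int) m) (min (cntLe l2 (k - 1) : Int) m) (PySem.List.pyRange k 128)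
    = decide (∀ c : Int, k ≤ c → c < 128 →
        ¬ (min (cntLe l1 c : Int) m > min (cntLe l2 c : Int) m)) := by
  intro fuel
  induction fuel with
  | zero =>
    intro k hk
    have hnil : PySem.List.pyRange k 128 = [] := PySem.List.pyRange_one_eq_nil (by omega)
    rw [hnil]
    have : ∀ c : Int, k ≤ c → c < 128 →
        ¬ (min (cntLe l1 c : Int) m > min (cntLe l2 c : Int) m) := by
      intro c h1 h2; omega
    simp only [okLe]
    exact (decide_eq_true this).symm
  | succ fuel ih =>
    intro k hk
    have hlt : k < 128 := by omega
    rw [PySem.List.pyRange_one_cons hlt]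
    have hsplit1 : min (min (cntLe l1 (k - 1) : Int) m + (cntEq l1 k : Int)) m
        = min (cntLe l1 k : Int) m := by
      have := cntLe_split l1 k; omega
    have hsplit2 : min (min (cntLe l2 (k - 1) : Int) m + (cntEq l2 k : Int)) m
        = min (cntLe l2 k : Int) m := by
      have := cntLe_split l2 k; omega
    simp only [okLe, hsplit1, hsplit2]
    have hrec := ih (k + 1) (by omega)
    have hk1 : k + 1 - 1 = k := by ring
    rw [hk1] at hrec
    rw [hrec]
    by_cases h : min (cntLe l1 k : Int) m > min (cntLe l2 k : Int) m
    · have hfalse : ¬ (∀ c : Int, k ≤ c → c < 128 →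
          ¬ (min (cntLe l1 c : Int) m > min (cntLe l2 c : Int) m)) := by
        intro hall; exact hall k le_rfl (by omega) h
      rw [decide_eq_true h, decide_eq_false hfalse]
      simp
    · have hiff : (∀ c : Int, k + 1 ≤ c → c < 128 →
          ¬ (min (cntLe l1 c : Int) m > min (cntLe l2 c : Int) m)) ↔
          (∀ c : Int, k ≤ c → c < 128 →
          ¬ (min (cntLe l1 c : Int) m > min (cntLe l2 c : Int) m)) := by
        constructor
        · intro hall c hc1 hc2
          rcases eq_or_lt_of_le hc1 with heq | hlt'
          · rw [← heq]; exact h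
          · exact hall c (by omega) hc2
        · intro hall c hc1 hc2; exact hall c (by omega) hc2
      rw [decide_eq_false h]
      simp only [Bool.not_false, Bool.true_and]
      exact decide_eq_decide.mpr hiff

lemma okGe_eq (l1 l2 : List Char) (m : Int) : ∀ (fuel : Nat) (k : Int), k = 128 - (fuel : Int) →
    okGe l1 l2 m (min (cntLe l1 (k - 1) : Int) m) (min (cntLe l2 (k - 1) : Int) m) (PySem.List.pyRange k 128)
    = decide (∀ c : Int, k ≤ c → c < 128 →
        ¬ (min (cntLe l2 c : Int) m > min (cntLe l1 c : Int) m)) := by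
  intro fuel
  induction fuel with
  | zero =>
    intro k hk
    have hnil : PySem.List.pyRange k 128 = [] := PySem.List.pyRange_one_eq_nil (by omega)
    rw [hnil]
    have : ∀ c : Int, k ≤ c → c < 128 →
        ¬ (min (cntLe l2 c : Int) m > min (cntLe l1 c : Int) m) := by
      intro c h1 h2; omega
    simp only [okGe]
    exact (decide_eq_true this).symm
  | succ fuel ih =>
    intro k hk
    have hlt : k < 128 := by omega
    rw [PySem.List.pyRange_one_cons hlt]
    have hsplit1 : min (min (cntLe l1 (k - 1) : Int) m + (cntEq l1 k : Int)) m
        = min (cntLe l1 k : Int) m := by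
      have := cntLe_split l1 k; omega
    have hsplit2 : min (min (cntLe l2 (k - 1) : Int) m + (cntEq l2 k : Int)) m
        = min (cntLe l2 k : Int) m := by
      have := cntLe_split l2 k; omega
    simp only [okGe, hsplit1, hsplit2]
    have hrec := ih (k + 1) (by omega)
    have hk1 : k + 1 - 1 = k := by ring
    rw [hk1] at hrec
    rw [hrec]
    by_cases h : min (cntLe l2 k : Int) m > min (cntLe l1 k : Int) m
    · have hfalse : ¬ (∀ c : Int, k ≤ c → c < 128 →
          ¬ (min (cntLe l2 c : Int) m > min (cntLe l1 c : Int) m)) := by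
        intro hall; exact hall k le_rfl (by omega) h
      rw [decide_eq_true h, decide_eq_false hfalse]
      simp
    · have hiff : (∀ c : Int, k + 1 ≤ c → c < 128 →
          ¬ (min (cntLe l2 c : Int) m > min (cntLe l1 c : Int) m)) ↔
          (∀ c : Int, k ≤ c → c < 128 →
          ¬ (min (cntLe l2 c : Int) m > min (cntLe l1 c : Int) m)) := by
        constructor
        · intro hall c hc1 hc2
          rcases eq_or_lt_of_le hc1 with heq | hlt'
          · rw [← heq]; exact h
          · exact hall c (by omega) hc2
        · intro hall c hc1 hc2; exact hall c (by omega) hc2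
      rw [decide_eq_false h]
      simp only [Bool.not_false, Bool.true_and]
      exact decide_eq_decide.mpr hiff

lemma dom_char_le (s : String) (h : pvDomStr s = true) : ∀ ch ∈ s.toList, ch.toNat ≤ 126 := by
  intro ch hch
  have := (List.all_eq_true.mp h) ch hch
  simp only [pvDomChar, Bool.or_eq_true, Bool.and_eq_true, decide_eq_true_eq, beq_iff_eq] at this
  rcases this with ((⟨_, h2⟩ | h2) | h2) | h2 <;> omega

-- the histogram read in B's loop is the multiplicity cntEq
lemma counts_getD (s : String) (code : Int) (h0 : 0 ≤ code) (h1 : code < 128) :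
    (s.toList.foldl bumpCount (List.replicate 128 0)).getD code.toNat 0
      = (cntEq s.toList code : Int) := by
  have hk : code.toNat < (List.replicate 128 (0 : Int)).length := by
    simpa using (show code.toNat < 128 by omega)
  rw [countFold s.toList (List.replicate 128 0) code.toNat hk]
  have hrep : (List.replicate 128 (0 : Int)).getD code.toNat 0 = 0 := by
    rw [List.getD_eq_getElem _ _ hk]
    exact List.getElem_replicate _
  rw [hrep, zero_add]
  have hpred : ∀ ch : Char, (ch.toNat == code.toNat) = ((ch.toNat : Int) == code) := by
    intro ch
    rw [Bool.eq_iff_iff]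
    simp only [beq_iff_eq]
    omega
  simp only [cntEq]
  congr 1
  refine List.countP_congr ?_
  intro a _
  rw [hpred a]

-- ===== VERDICT (by name: the statement is the Claim_ definition above) =====
theorem checkIfCanBreak_spec : Claim_equal_checkIfCanBreak := by
  intro s1 s2 hdom hpre
  unfold Spec_checkIfCanBreak
  unfold Dom_checkIfCanBreak at hdom
  simp only [Bool.and_eq_true] at hdom
  obtain ⟨hd1, hd2⟩ := hdom
  unfold Pre_checkIfCanBreak at hpre
  set l1 := PySem.List.sorted s1.toList (fun x => x) with hl1
  set l2 := PySem.List.sorted s2.toList (fun x => x) with hl2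
  have hp1 : l1.Perm s1.toList := PySem.List.sorted_perm _ _ _
  have hp2 : l2.Perm s2.toList := PySem.List.sorted_perm _ _ _
  have hlen1 : l1.length = s1.toList.length := hp1.length_eq
  have hlen2 : l2.length = s2.toList.length := hp2.length_eq
  have hlen : l1.length ≤ l2.length := by omega
  have hs1 : l1.Pairwise (· ≤ ·) := PySem.List.sorted_pairwise _ _
  have hs2 : l2.Pairwise (· ≤ ·) := PySem.List.sorted_pairwise _ _
  have hb1 : ∀ ch ∈ s1.toList, ch.toNat ≤ 126 := dom_char_le s1 hd1
  have hb2 : ∀ ch ∈ s2.toList, ch.toNat ≤ 126 := dom_char_le s2 hd2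
  have hc1 : ∀ c : Int, cntLe l1 c = cntLe s1.toList c := fun c => cntLe_perm hp1 c
  have hc2 : ∀ c : Int, cntLe l2 c = cntLe s2.toList c := fun c => cntLe_perm hp2 c
  -- A's loop result, pointwise over the sorted lists
  have hA : checkIfCanBreak s1 s2 = true ↔
      ((∀ (i : Nat) (hi : i < l1.length), l1[i] ≤ l2[i]'(lt_of_lt_of_le hi hlen)) ∨
       (∀ (i : Nat) (hi : i < l1.length), l2[i]'(lt_of_lt_of_le hi hlen) ≤ l1[i])) := by
    have e1 : (∀ i ∈ PySem.List.pyRange 0 (l1.length : Int),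
        (!decide (PySem.List.pyGetD l2 i ' ' < PySem.List.pyGetD l1 i ' ')) = true) ↔
        (∀ (i : Nat) (hi : i < l1.length), l1[i] ≤ l2[i]'(lt_of_lt_of_le hi hlen)) := by
      constructor
      · intro hall i hi
        have := hall (i : Int) (PySem.List.mem_pyRange_one.mpr ⟨by omega, by omega⟩)
        rw [PySem.List.pyGetD_eq_getElem l1 ' ' (by omega) (by omega),
            PySem.List.pyGetD_eq_getElem l2 ' ' (by omega) (by omega)] at this
        simp only [Int.toNat_natCast, Bool.not_eq_true', decide_eq_false_iff_not] at this
        exact not_lt.mp this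
      · intro hpt i hmem
        obtain ⟨h0, hlti⟩ := PySem.List.mem_pyRange_one.mp hmem
        rw [PySem.List.pyGetD_eq_getElem l1 ' ' h0 (by omega),
            PySem.List.pyGetD_eq_getElem l2 ' ' h0 (by omega)]
        simp only [Bool.not_eq_true', decide_eq_false_iff_not]
        exact not_lt.mpr (hpt i.toNat (by omega))
    have e2 : (∀ i ∈ PySem.List.pyRange 0 (l1.length : Int),
        (!decide (PySem.List.pyGetD l1 i ' ' < PySem.List.pyGetD l2 i ' ')) = true) ↔
        (∀ (i : Nat) (hi : i < l1.length), l2[i]'(lt_of_lt_of_le hi hlen) ≤ l1[i]) := by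
      constructor
      · intro hall i hi
        have := hall (i : Int) (PySem.List.mem_pyRange_one.mpr ⟨by omega, by omega⟩)
        rw [PySem.List.pyGetD_eq_getElem l1 ' ' (by omega) (by omega),
            PySem.List.pyGetD_eq_getElem l2 ' ' (by omega) (by omega)] at this
        simp only [Int.toNat_natCast, Bool.not_eq_true', decide_eq_false_iff_not] at this
        exact not_lt.mp this
      · intro hpt i hmem
        obtain ⟨h0, hlti⟩ := PySem.List.mem_pyRange_one.mp hmem
        rw [PySem.List.pyGetD_eq_getElem l1 ' ' h0 (by omega),
            PySem.List.pyGetD_eq_getElem l2 ' ' h0 (by omega)]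
        simp only [Bool.not_eq_true', decide_eq_false_iff_not]
        exact not_lt.mpr (hpt i.toNat (by omega))
    show checkIfCanBreak s1 s2 = true ↔ _
    simp only [checkIfCanBreak]
    rw [← hl1, ← hl2, foldA_eq]
    rw [Bool.true_and, Bool.true_and, Bool.or_eq_true]
    exact or_congr (List.all_eq_true.trans e1) (List.all_eq_true.trans e2)
  -- B's loop result, as count-domination over all of Int
  have hB : checkIfCanBreak_alt s1 s2 = true ↔
      ((∀ c : Int, ¬ ((cntLe s1.toList c : Int) < (s1.toList.length : Int) ∧
          (cntLe s2.toList c : Int) > (cntLe s1.toList c : Int))) ∨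
       (∀ c : Int, (cntLe s1.toList c : Int) ≤ (cntLe s2.toList c : Int))) := by
    set m : Int := min (s1.toList.length : Int) (s2.toList.length : Int) with hm
    have hmeq : m = (s1.toList.length : Int) := by
      rw [hm]; omega
    have h0a : min ((cntLe s1.toList ((0:Int) - 1) : Nat) : Int) m = 0 := by
      rw [cntLe_neg s1.toList _ (by omega)]
      simp; omega
    have h0b : min ((cntLe s2.toList ((0:Int) - 1) : Nat) : Int) m = 0 := by
      rw [cntLe_neg s2.toList _ (by omega)]
      simp; omega
    have hge' : okGe s1.toList s2.toList m 0 0 (PySem.List.pyRange 0 128)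
        = decide (∀ c : Int, 0 ≤ c → c < 128 →
            ¬ (min (cntLe s2.toList c : Int) m > min (cntLe s1.toList c : Int) m)) := by
      have := okGe_eq s1.toList s2.toList m 128 0 (by norm_num)
      rw [h0a, h0b] at this
      exact this
    have hle' : okLe s1.toList s2.toList m 0 0 (PySem.List.pyRange 0 128)
        = decide (∀ c : Int, 0 ≤ c → c < 128 →
            ¬ (min (cntLe s1.toList c : Int) m > min (cntLe s2.toList c : Int) m)) := by
      have := okLe_eq s1.toList s2.toList m 128 0 (by norm_num)
      rw [h0a, h0b] at this
      exact this
    -- capped domination over [0,128) coincides with A's two per-code conditions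
    have ext1 : (∀ c : Int, 0 ≤ c → c < 128 →
        ¬ (min (cntLe s2.toList c : Int) m > min (cntLe s1.toList c : Int) m)) ↔
        (∀ c : Int, ¬ ((cntLe s1.toList c : Int) < (s1.toList.length : Int) ∧
          (cntLe s2.toList c : Int) > (cntLe s1.toList c : Int))) := by
      constructor
      · intro hall c
        have hA1 := cntLe_le_length s1.toList c
        rcases lt_trichotomy c 0 with hc | hc | hc
        · rw [cntLe_neg s1.toList c hc, cntLe_neg s2.toList c hc]; omega
        · have := hall c (by omega) (by omega); omega
        · by_cases hc' : c < 128
          · have := hall c (by omega) hc'; omega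
          · rw [cntLe_big s1.toList c (by omega) hb1]; omega
      · intro hall c _ _
        have hA1 := cntLe_le_length s1.toList c
        have := hall c
        omega
    have ext2 : (∀ c : Int, 0 ≤ c → c < 128 →
        ¬ (min (cntLe s1.toList c : Int) m > min (cntLe s2.toList c : Int) m)) ↔
        (∀ c : Int, (cntLe s1.toList c : Int) ≤ (cntLe s2.toList c : Int)) := by
      constructor
      · intro hall c
        have hA1 := cntLe_le_length s1.toList c
        have hA2 := cntLe_le_length s2.toList c
        rcases lt_trichotomy c 0 with hc | hc | hc
        · rw [cntLe_neg s1.toList c hc]; omega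
        · have := hall c (by omega) (by omega); omega
        · by_cases hc' : c < 128
          · have := hall c (by omega) hc'; omega
          · rw [cntLe_big s1.toList c (by omega) hb1, cntLe_big s2.toList c (by omega) hb2]
            omega
      · intro hall c _ _
        have hA1 := cntLe_le_length s1.toList c
        have := hall c
        omega
    have hcongr := PySem.List.foldl_congr_mem (PySem.List.pyRange 0 128)
      (fun (st : Int × Int × Bool × Bool) code =>
        (min (st.1 + (List.foldl bumpCount (List.replicate 128 0) s1.toList).getD code.toNat 0) m,
         min (st.2.1 + (List.foldl bumpCount (List.replicate 128 0) s2.toList).getD code.toNat 0) m,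
         if min (st.2.1 + (List.foldl bumpCount (List.replicate 128 0) s2.toList).getD code.toNat 0) m >
            min (st.1 + (List.foldl bumpCount (List.replicate 128 0) s1.toList).getD code.toNat 0) m then false
         else st.2.2.1,
         if min (st.1 + (List.foldl bumpCount (List.replicate 128 0) s1.toList).getD code.toNat 0) m >
            min (st.2.1 + (List.foldl bumpCount (List.replicate 128 0) s2.toList).getD code.toNat 0) m then false
         else st.2.2.2))
      (fun (st : Int × Int × Bool × Bool) code =>
        (min (st.1 + (cntEq s1.toList code : Int)) m,
         min (st.2.1 + (cntEq s2.toList code : Int)) m,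
         if min (st.2.1 + (cntEq s2.toList code : Int)) m >
            min (st.1 + (cntEq s1.toList code : Int)) m then false
         else st.2.2.1,
         if min (st.1 + (cntEq s1.toList code : Int)) m >
            min (st.2.1 + (cntEq s2.toList code : Int)) m then false
         else st.2.2.2))
      (0, 0, true, true)
      (by
        intro st code hmem
        obtain ⟨hc0, hc128⟩ := PySem.List.mem_pyRange_one.mp hmem
        simp only [counts_getD s1 code hc0 hc128, counts_getD s2 code hc0 hc128])
    show checkIfCanBreak_alt s1 s2 = true ↔ _
    simp only [checkIfCanBreak_alt]
    rw [← hm, hcongr, foldB_eq]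
    simp only [Bool.true_and]
    rw [hge', hle', Bool.or_eq_true]
    simp only [decide_eq_true_eq]
    exact or_congr ext1 ext2
  -- the two characterizations agree
  have hgeq := ge_equiv l1 l2 hs1 hs2 hlen
  have hleq := le_equiv l1 l2 hs1 hs2 hlen
  simp only [hc1, hc2] at hgeq hleq
  have hcast : ((s1.toList.length : Nat) : Int) = ((l1.length : Nat) : Int) := by omega
  rw [hcast] at hB
  have hfinal : (checkIfCanBreak s1 s2 = true) ↔ (checkIfCanBreak_alt s1 s2 = true) := by
    rw [hA, hB]
    exact or_congr hgeq hleq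
  cases hA' : checkIfCanBreak s1 s2 <;> cases hB' : checkIfCanBreak_alt s1 s2 <;> simp_all
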